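-- pv_equiv track=rewrite | github.com/vptuan/COMP1819ADS | Lab_01/ANS_03.py | furthest_points
-- ===== SOURCE A (Python) =====
-- def calculate_distance_squared(point):
--     """Calculate the square of the Euclidean distance of a point from the origin."""
--     x, y = point
--     return x**2 + y**2
--
-- def furthest_points(points):
--     """Find the furthest and second furthest points from the origin."""
--     if len(points) < 2:
--         raise ValueError("At least two points are required.")
--
--     # Initialize variables to store the furthest and second furthest points
--     furthest = points[0]
--     second_furthest = points[1]
--
--     # Calculate initial distances
--     max_distance = calculate_distance_squared(furthest)
--     second_max_distance = calculate_distance_squared(second_furthest)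
--
--     # Ensure `furthest` has the larger distance initially
--     if second_max_distance > max_distance:
--         furthest, second_furthest = second_furthest, furthest
--         max_distance, second_max_distance = second_max_distance, max_distance
--
--     # Iterate through the remaining points
--     for point in points[2:]:
--         distance = calculate_distance_squared(point)
--
--         if distance > max_distance:
--             # Update both furthest and second furthest
--             second_furthest = furthest
--             second_max_distance = max_distance
--
--             furthest = point
--             max_distance = distance
--         elif distance > second_max_distance:
--             # Update only the second furthest
--             second_furthest = point
--             second_max_distance = distance
--
--     return furthest, second_furthest
-- ===== SOURCE B (Python) =====
-- def calculate_distance_squared(point):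
--     """Calculate the square of the Euclidean distance of a point from the origin."""
--     x, y = point
--     return x**2 + y**2
--
-- def furthest_points(points):
--     """Find the furthest and second furthest points from the origin."""
--     if len(points) < 2:
--         raise ValueError("At least two points are required.")
--     dists = [calculate_distance_squared(p) for p in points]
--     i = dists.index(max(dists))
--     second = max(points[:i] + points[i + 1:], key=calculate_distance_squared)
--     return points[i], second
-- ===== Notes on version B (the rewrite author's own statement) =====
-- stated objective: simpler
-- what changed: Replaces the one-pass top-2 tracker with swap/update state by a two-pass decomposition: find the first-occurrence argmax index of the distance list, then take the first-occurrence max (by the same key) of the list with that index removed.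
import Mathlib
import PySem

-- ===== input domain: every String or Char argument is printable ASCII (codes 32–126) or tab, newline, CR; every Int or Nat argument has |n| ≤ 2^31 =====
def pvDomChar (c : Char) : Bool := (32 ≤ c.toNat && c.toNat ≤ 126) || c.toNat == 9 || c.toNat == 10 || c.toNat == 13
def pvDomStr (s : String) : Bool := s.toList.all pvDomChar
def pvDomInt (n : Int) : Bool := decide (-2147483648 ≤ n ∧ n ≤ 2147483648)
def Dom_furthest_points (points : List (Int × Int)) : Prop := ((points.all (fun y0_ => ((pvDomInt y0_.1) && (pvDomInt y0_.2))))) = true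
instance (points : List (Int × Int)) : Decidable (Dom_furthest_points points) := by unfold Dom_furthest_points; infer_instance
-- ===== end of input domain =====

-- B replaces A's one-pass top-2 tracker by a two-pass argmax-then-max-of-rest decomposition (return value only; neither mutates).

-- ===== PORT A =====
def calculate_distance_squared (p : Int × Int) : Int := p.1 ^ 2 + p.2 ^ 2

-- loop state: ((furthest, second_furthest), (max_distance, second_max_distance))
def stepA (st : ((Int × Int) × (Int × Int)) × (Int × Int)) (p : Int × Int) :
    ((Int × Int) × (Int × Int)) × (Int × Int) :=
  let dd := calculate_distance_squared p
  if dd > st.2.1 then ((p, st.1.1), (dd, st.2.1))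
  else if dd > st.2.2 then ((st.1.1, p), (st.2.1, dd))
  else st

def furthest_points (points : List (Int × Int)) : (Int × Int) × (Int × Int) :=
  match points with
  | p0 :: p1 :: rest =>
    let md0 := calculate_distance_squared p0
    let md1 := calculate_distance_squared p1
    let init := if md1 > md0 then ((p1, p0), (md1, md0)) else ((p0, p1), (md0, md1))
    (rest.foldl stepA init).1
  | _ => ((0, 0), (0, 0))  -- len(points) < 2: Python raises ValueError; excluded by Pre_

-- ===== PORT B =====
def furthest_points_alt (points : List (Int × Int)) : (Int × Int) × (Int × Int) :=
  let dists := points.map calculate_distance_squared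
  match PySem.List.max? dists (fun x => x) with       -- max(dists)
  | none => ((0, 0), (0, 0))                          -- len < 2: Python raises; excluded by Pre_
  | some m =>
    match PySem.List.index? dists m with              -- dists.index(...)
    | none => ((0, 0), (0, 0))                        -- unreachable: m ∈ dists
    | some i =>
      let rest := PySem.List.slice points none (some (i : Int)) ++
                  PySem.List.slice points (some ((i : Int) + 1)) none
      match PySem.List.pyGet? points (i : Int),
            PySem.List.max? rest calculate_distance_squared with   -- max(rest, key=...)
      | some f, some s => (f, s)
      | _, _ => ((0, 0), (0, 0))                      -- unreachable: len ≥ 2 under Pre_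

-- ===== PRECONDITION & SPEC =====
-- Python A raises ValueError exactly when len(points) < 2; only those inputs are excluded.
def Pre_furthest_points (points : List (Int × Int)) : Prop := 2 ≤ points.length
instance (points : List (Int × Int)) : Decidable (Pre_furthest_points points) := by
  unfold Pre_furthest_points; infer_instance

def pvWitness_furthest_points : (List (Int × Int)) := [(3, 4), (1, 2)]

def Spec_furthest_points (points : List (Int × Int)) (out : (Int × Int) × (Int × Int)) : Prop :=
  out = furthest_points_alt points
instance (points : List (Int × Int)) (out : (Int × Int) × (Int × Int)) :
    Decidable (Spec_furthest_points points out) := by unfold Spec_furthest_points; infer_instance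

-- ===== CLAIM (what is proved, stated in full; the proofs are below) =====
def Claim_equal_furthest_points : Prop :=
  ∀ (points : List (Int × Int)), Dom_furthest_points points → Pre_furthest_points points →
    Spec_furthest_points points (furthest_points points)

-- ===== LEMMAS AND PROOFS =====

lemma max?_append_singleton (xs : List (Int × Int)) (x m : Int × Int)
    (h : PySem.List.max? xs calculate_distance_squared = some m) :
    PySem.List.max? (xs ++ [x]) calculate_distance_squared =
      if calculate_distance_squared m < calculate_distance_squared x then some x else some m := by
  unfold PySem.List.max? at h ⊢
  rw [List.foldl_append, h]
  simp

-- Loop invariant for A's fold: the state holds the first-occurrence maximum f (at index i)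
-- and the first-occurrence maximum s of the list with index i removed, with their distances.
theorem invA (p0 p1 : Int × Int) (rest : List (Int × Int)) :
    ∃ f s i,
      rest.foldl stepA
        (if calculate_distance_squared p1 > calculate_distance_squared p0
         then ((p1, p0), (calculate_distance_squared p1, calculate_distance_squared p0))
         else ((p0, p1), (calculate_distance_squared p0, calculate_distance_squared p1)))
        = ((f, s), (calculate_distance_squared f, calculate_distance_squared s)) ∧
      (∀ y ∈ p0 :: p1 :: rest, calculate_distance_squared y ≤ calculate_distance_squared f) ∧
      PySem.List.max? (p0 :: p1 :: rest) calculate_distance_squared = some f ∧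
      PySem.List.index? ((p0 :: p1 :: rest).map calculate_distance_squared)
        (calculate_distance_squared f) = some i ∧
      (p0 :: p1 :: rest)[i]? = some f ∧
      PySem.List.max? ((p0 :: p1 :: rest).take i ++ (p0 :: p1 :: rest).drop (i+1))
        calculate_distance_squared = some s := by
  induction rest using List.reverseRecOn with
  | nil =>
    by_cases h : calculate_distance_squared p1 > calculate_distance_squared p0
    · refine ⟨p1, p0, 1, ?_, ?_, ?_, ?_, ?_, ?_⟩
      · simp [h]
      · intro y hy; rcases List.mem_pair.mp hy with rfl | rfl <;> omega
      · simp [PySem.List.max?, show calculate_distance_squared p0 < calculate_distance_squared p1 from h]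
      · have hne : calculate_distance_squared p0 ≠ calculate_distance_squared p1 := by omega
        rw [show ((p0 :: p1 :: ([] : List (Int × Int))).map calculate_distance_squared)
            = calculate_distance_squared p0 :: [calculate_distance_squared p1] from rfl,
          PySem.List.index?_cons_of_ne _ hne, PySem.List.index?_cons_self]
        rfl
      · rfl
      · simp [PySem.List.max?]
    · refine ⟨p0, p1, 0, ?_, ?_, ?_, ?_, ?_, ?_⟩
      · simp [h]
      · intro y hy; rcases List.mem_pair.mp hy with rfl | rfl <;> omega
      · simp [PySem.List.max?]
        omega
      · rw [show ((p0 :: p1 :: ([] : List (Int × Int))).map calculate_distance_squared)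
            = calculate_distance_squared p0 :: [calculate_distance_squared p1] from rfl,
          PySem.List.index?_cons_self]
      · rfl
      · simp [PySem.List.max?]
  | append_singleton t p ih =>
    obtain ⟨f, s, i, Hfold, Hbd, Hm, Hidx, Hget, Hmax⟩ := ih
    have hl : p0 :: p1 :: (t ++ [p]) = (p0 :: p1 :: t) ++ [p] := by simp
    have hfold' : (t ++ [p]).foldl stepA
        (if calculate_distance_squared p1 > calculate_distance_squared p0
         then ((p1, p0), (calculate_distance_squared p1, calculate_distance_squared p0))
         else ((p0, p1), (calculate_distance_squared p0, calculate_distance_squared p1)))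
        = stepA ((f, s), (calculate_distance_squared f, calculate_distance_squared s)) p := by
      rw [List.foldl_append, Hfold]; rfl
    obtain ⟨hlt, heq⟩ := List.getElem?_eq_some_iff.mp Hget
    have hfmem : f ∈ p0 :: p1 :: t := heq ▸ List.getElem_mem hlt
    have hile : i ≤ (p0 :: p1 :: t).length := le_of_lt hlt
    by_cases hgt : calculate_distance_squared f < calculate_distance_squared p
    · refine ⟨p, f, (p0 :: p1 :: t).length, ?_, ?_, ?_, ?_, ?_, ?_⟩
      · rw [hfold']; simp [stepA, hgt]
      · intro y hy
        rw [hl, List.mem_append] at hy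
        rcases hy with hy | hy
        · exact le_of_lt (lt_of_le_of_lt (Hbd y hy) hgt)
        · simp at hy; subst hy; exact le_refl _
      · rw [hl, max?_append_singleton _ _ _ Hm, if_pos hgt]
      · rw [hl, List.map_append]
        have hnotin : calculate_distance_squared p ∉ (p0 :: p1 :: t).map calculate_distance_squared := by
          intro hmem
          obtain ⟨y, hy, hey⟩ := List.mem_map.mp hmem
          have := Hbd y hy
          omega
        rw [List.map_singleton, PySem.List.index?_append_singleton_self _ _ hnotin]
        simp
      · rw [hl]; simp
      · rw [hl, List.take_left,
          List.drop_eq_nil_of_le (by simp : ((p0 :: p1 :: t) ++ [p]).length ≤ (p0 :: p1 :: t).length + 1),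
          List.append_nil]
        exact Hm
    · refine ⟨f, if calculate_distance_squared s < calculate_distance_squared p then p else s, i,
        ?_, ?_, ?_, ?_, ?_, ?_⟩
      · rw [hfold']
        by_cases h2 : calculate_distance_squared s < calculate_distance_squared p
        · simp [stepA, hgt, h2]
        · simp [stepA, hgt, h2]
      · intro y hy
        rw [hl, List.mem_append] at hy
        rcases hy with hy | hy
        · exact Hbd y hy
        · simp at hy; subst hy; omega
      · rw [hl, max?_append_singleton _ _ _ Hm, if_neg hgt]
      · rw [hl, List.map_append, PySem.List.index?_append_of_mem _ (List.mem_map_of_mem hfmem)]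
        exact Hidx
      · rw [hl, List.getElem?_append_left hlt]
        exact Hget
      · rw [hl, List.take_append_of_le_length hile, List.drop_append_of_le_length hlt,
          ← List.append_assoc, max?_append_singleton _ _ _ Hmax]
        split_ifs <;> rfl

theorem main_eq (points : List (Int × Int)) (h : 2 ≤ points.length) :
    furthest_points points = furthest_points_alt points := by
  match points, h with
  | p0 :: p1 :: rest, _ =>
    obtain ⟨f, s, i, Hfold, Hbd, Hm, Hidx, Hget, Hmax⟩ := invA p0 p1 rest
    have hA : furthest_points (p0 :: p1 :: rest) = (f, s) := by
      simp only [furthest_points, Hfold]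
    have hne : (p0 :: p1 :: rest).map calculate_distance_squared ≠ [] := by simp
    obtain ⟨m, hm⟩ : ∃ m, PySem.List.max? ((p0 :: p1 :: rest).map calculate_distance_squared)
        (fun x => x) = some m := by
      apply Option.ne_none_iff_exists'.mp
      intro hcon
      exact hne ((PySem.List.max?_eq_none_iff _ _).mp hcon)
    have hmem := PySem.List.max?_mem hm
    have hmax := PySem.List.max?_isMax hm
    have hmf : m = calculate_distance_squared f := by
      obtain ⟨y, hy, hey⟩ := List.mem_map.mp hmem
      have h1 : m ≤ calculate_distance_squared f := hey ▸ Hbd y hy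
      obtain ⟨hlt, heq⟩ := List.getElem?_eq_some_iff.mp Hget
      have hfm : calculate_distance_squared f ∈ (p0 :: p1 :: rest).map calculate_distance_squared :=
        List.mem_map_of_mem (heq ▸ List.getElem_mem hlt)
      exact le_antisymm h1 (hmax _ hfm)
    subst hmf
    have hslice1 : PySem.List.slice (p0 :: p1 :: rest) none (some (i : Int))
        = (p0 :: p1 :: rest).take i := PySem.List.slice_to_natCast _ _
    have hcast : ((i : Int) + 1) = ((i + 1 : Nat) : Int) := by push_cast; ring
    have hslice2 : PySem.List.slice (p0 :: p1 :: rest) (some ((i : Int) + 1)) none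
        = (p0 :: p1 :: rest).drop (i + 1) := by
      rw [hcast]; exact PySem.List.slice_from_natCast _ _
    have hget' : PySem.List.pyGet? (p0 :: p1 :: rest) (i : Int) = some f := by
      rw [PySem.List.pyGet?_natCast]; exact Hget
    rw [hA]
    simp only [furthest_points_alt, hm, Hidx, hslice1, hslice2, hget', Hmax]

-- ===== VERDICT (by name: the statement is the Claim_ definition above) =====
theorem furthest_points_spec : Claim_equal_furthest_points := by
  intro points _ hpre
  exact main_eq points hpre
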